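-- pv_equiv track=rewrite | github.com/ErgodicEntropy/SchemaTheoremProver | Schemata.py | Defining_Length
-- ===== SOURCE A (Python) =====
-- def Defining_Length(Schema): #last wildcard position - first wildcard position
--     placeholder = [] #indexlist or wildcard symbol list
--     L = len(Schema)
--     for k in range(L):
--         if Schema[k] == '*':
--             placeholder.append(k)
--         else:
--             continue
--     M = max(placeholder)
--     m = min(placeholder)
--     return M - m
-- ===== SOURCE B (Python) =====
-- def Defining_Length(Schema):
--     first = Schema.index('*')
--     last = len(Schema) - 1 - Schema[::-1].index('*')
--     return last - first
-- ===== Notes on version B (the rewrite author's own statement) =====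
-- stated objective: idiomatic
-- what changed: Instead of collecting every wildcard position into a list and taking max/min, B finds the first '*' with str.index and the last '*' by indexing into the reversed string, building no intermediate list.
import Mathlib
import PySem

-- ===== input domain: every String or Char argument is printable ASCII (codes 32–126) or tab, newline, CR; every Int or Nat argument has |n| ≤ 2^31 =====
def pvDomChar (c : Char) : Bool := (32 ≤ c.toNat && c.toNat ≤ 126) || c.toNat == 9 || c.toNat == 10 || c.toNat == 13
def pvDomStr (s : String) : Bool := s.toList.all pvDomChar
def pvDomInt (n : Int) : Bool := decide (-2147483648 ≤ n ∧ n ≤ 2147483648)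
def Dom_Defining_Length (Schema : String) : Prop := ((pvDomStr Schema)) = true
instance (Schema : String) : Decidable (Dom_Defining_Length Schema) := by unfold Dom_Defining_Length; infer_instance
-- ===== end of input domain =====

-- B finds the first '*' with str.index and the last via the reversed string, building no position list (idiomatic).


-- ===== PORT A =====
def Defining_Length (Schema : String) : Int :=
  let cs := Schema.toList
  let L := cs.length
  let placeholder : List Int :=
    (PySem.List.pyRange 0 (L : Int) 1).foldl
      (fun acc k => if PySem.List.pyGetD cs k ' ' == '*' then acc ++ [k] else acc) []
  -- max()/min() of an empty list raise ValueError in Python: none here, excluded by Pre_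
  match PySem.List.max? placeholder (fun x => x), PySem.List.min? placeholder (fun x => x) with
  | some M, some m => M - m
  | _, _ => 0

-- ===== PORT B =====
-- Schema.index('*') is PySem.List.index? on the characters; Schema[::-1] is toList.reverse
-- (PySem.Str.slice?_none_none_neg_one); .index raising ValueError = index? none, excluded by Pre_
def Defining_Length_alt (Schema : String) : Int :=
  let cs := Schema.toList
  match PySem.List.index? cs '*' with
  | none => 0
  | some first =>
    match PySem.List.index? cs.reverse '*' with
    | none => 0
    | some ridx =>
      let last : Int := (cs.length : Int) - 1 - (ridx : Int)
      last - (first : Int)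

-- ===== PRECONDITION & SPEC =====
-- A raises ValueError (max of empty list) when Schema contains no '*'; B's .index raises there too.
def Pre_Defining_Length (Schema : String) : Prop := '*' ∈ Schema.toList
instance (Schema : String) : Decidable (Pre_Defining_Length Schema) := by unfold Pre_Defining_Length; infer_instance
def pvWitness_Defining_Length : String := "1*0*1"
def Spec_Defining_Length (Schema : String) (out : Int) : Prop := out = Defining_Length_alt Schema
instance (Schema : String) (out : Int) : Decidable (Spec_Defining_Length Schema out) := by unfold Spec_Defining_Length; infer_instance

-- ===== CLAIM (what is proved, stated in full; the proofs are below) =====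
def Claim_equal_Defining_Length : Prop := ∀ (Schema : String), Dom_Defining_Length Schema → Pre_Defining_Length Schema → Spec_Defining_Length Schema (Defining_Length Schema)

-- ===== LEMMAS AND PROOFS =====

-- membership in A's placeholder list
theorem mem_placeholder (cs : List Char) (i : Int) :
    i ∈ (PySem.List.pyRange 0 (cs.length : Int) 1).foldl
      (fun acc k => if PySem.List.pyGetD cs k ' ' == '*' then acc ++ [k] else acc) [] ↔
    ∃ (k : Nat) (hk : k < cs.length), i = (k : Int) ∧ cs[k] = '*' := by
  rw [PySem.List.foldl_append_if]
  simp only [List.nil_append, List.mem_map, List.mem_filter]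
  constructor
  · rintro ⟨j, ⟨hj, hp⟩, rfl⟩
    rw [PySem.List.pyRange_zero_natCast] at hj
    simp only [List.mem_map, List.mem_range] at hj
    obtain ⟨k, hk, rfl⟩ := hj
    refine ⟨k, hk, rfl, ?_⟩
    rw [PySem.List.pyGetD_natCast, List.getD_eq_getElem _ _ hk] at hp
    exact beq_iff_eq.mp hp
  · rintro ⟨k, hk, rfl, hstar⟩
    refine ⟨(k : Int), ⟨?_, ?_⟩, rfl⟩
    · rw [PySem.List.pyRange_zero_natCast]
      exact List.mem_map.mpr ⟨k, List.mem_range.mpr hk, rfl⟩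
    · rw [PySem.List.pyGetD_natCast, List.getD_eq_getElem _ _ hk]
      exact beq_iff_eq.mpr hstar

theorem Defining_Length_spec' (Schema : String) (hp : Pre_Defining_Length Schema) :
    Defining_Length Schema = Defining_Length_alt Schema := by
  unfold Pre_Defining_Length at hp
  unfold Defining_Length Defining_Length_alt
  set cs := Schema.toList with hcs
  -- first and last wildcard indices from B's side
  obtain ⟨f, hf⟩ := Option.isSome_iff_exists.mp ((PySem.List.index?_isSome_iff cs '*').mpr hp)
  have hp' : '*' ∈ cs.reverse := List.mem_reverse.mpr hp
  obtain ⟨r, hr⟩ := Option.isSome_iff_exists.mp ((PySem.List.index?_isSome_iff cs.reverse '*').mpr hp')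
  obtain ⟨hfl, hfget, hfmin⟩ := PySem.List.getElem_of_index?_eq_some hf
  obtain ⟨hrl, hrget, hrmin⟩ := PySem.List.getElem_of_index?_eq_some hr
  rw [List.length_reverse] at hrl
  have hlast : cs[cs.length - 1 - r]'(by omega) = '*' := by
    rw [← hrget]; rw [List.getElem_reverse]
  -- minimality of f over all wildcard positions
  have hfle : ∀ (k : Nat) (hk : k < cs.length), cs[k] = '*' → f ≤ k := by
    intro k hk hkstar
    by_contra h
    exact hfmin k (by omega) hkstar
  -- maximality of cs.length - 1 - r
  have hrle : ∀ (k : Nat) (hk : k < cs.length), cs[k] = '*' → k ≤ cs.length - 1 - r := by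
    intro k hk hkstar
    by_contra h
    have hj : cs.length - 1 - k < r := by omega
    apply hrmin (cs.length - 1 - k) hj
    rw [List.getElem_reverse]
    have : cs.length - 1 - (cs.length - 1 - k) = k := by omega
    simp only [this]
    exact hkstar
  -- A's placeholder list and its extrema
  set placeholder : List Int :=
    (PySem.List.pyRange 0 (cs.length : Int) 1).foldl
      (fun acc k => if PySem.List.pyGetD cs k ' ' == '*' then acc ++ [k] else acc) [] with hph
  have hfmem : (f : Int) ∈ placeholder := by
    rw [hph, mem_placeholder]; exact ⟨f, hfl, rfl, hfget⟩
  have hlmem : ((cs.length - 1 - r : Nat) : Int) ∈ placeholder := by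
    rw [hph, mem_placeholder]; exact ⟨_, by omega, rfl, hlast⟩
  have hne : placeholder ≠ [] := by intro h; rw [h] at hfmem; exact (List.not_mem_nil) hfmem
  obtain ⟨M, hM⟩ : ∃ M, PySem.List.max? placeholder (fun x : Int => x) = some M := by
    refine Option.isSome_iff_exists.mp ?_
    rw [Option.isSome_iff_ne_none]
    intro h
    exact hne ((PySem.List.max?_eq_none_iff _ _).mp h)
  obtain ⟨m, hm⟩ : ∃ m, PySem.List.min? placeholder (fun x : Int => x) = some m := by
    refine Option.isSome_iff_exists.mp ?_
    rw [Option.isSome_iff_ne_none]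
    intro h
    exact hne ((PySem.List.min?_eq_none_iff _ _).mp h)
  dsimp only
  rw [hf, hr, ← hph, hM, hm]
  -- pin M and m
  have hMmem := PySem.List.max?_mem hM
  have hmmem := PySem.List.min?_mem hm
  have hMisMax := PySem.List.max?_isMax hM
  have hmisMin := PySem.List.min?_isMin hm
  obtain ⟨kM, hkM, rfl, hkMstar⟩ := (mem_placeholder cs M).mp (hph ▸ hMmem)
  obtain ⟨km, hkm, rfl, hkmstar⟩ := (mem_placeholder cs m).mp (hph ▸ hmmem)
  have h1 : (kM : Int) ≤ ((cs.length - 1 - r : Nat) : Int) := by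
    exact_mod_cast Int.ofNat_le.mpr (hrle kM hkM hkMstar)
  have h2 : ((cs.length - 1 - r : Nat) : Int) ≤ (kM : Int) := hMisMax _ hlmem
  have h3 : (f : Int) ≤ (km : Int) := by exact_mod_cast Int.ofNat_le.mpr (hfle km hkm hkmstar)
  have h4 : (km : Int) ≤ (f : Int) := hmisMin _ hfmem
  have hM' : (kM : Int) = ((cs.length - 1 - r : Nat) : Int) := le_antisymm h1 h2
  have hm' : (km : Int) = (f : Int) := le_antisymm h4 h3
  rw [hM', hm']
  have : ((cs.length - 1 - r : Nat) : Int) = (cs.length : Int) - 1 - (r : Int) := by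
    omega
  rw [this]

-- ===== VERDICT (by name: the statement is the Claim_ definition above) =====
theorem Defining_Length_spec : Claim_equal_Defining_Length := by
  intro Schema _ hp
  exact Defining_Length_spec' Schema hp
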